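-- pv_equiv track=rewrite | github.com/sadegh-rizi/Rosalind- | Bioinformatics-Textbook-Track/BA1KLM.py | recursive_numbertopattern
-- ===== SOURCE A (Python) =====
-- symbol=['A','C','G','T']
--
-- def recursive_numbertopattern(index,k):
--     if k==1:
--         return symbol[index]
--
--     prefix_index = index//4
--     remainder = index%4
--     lsymbol = symbol[remainder]
--     prefix_pattern= recursive_numbertopattern(prefix_index,k-1)
--     return prefix_pattern+lsymbol
-- ===== SOURCE B (Python) =====
-- symbol=['A','C','G','T']
--
-- def recursive_numbertopattern(index, k):
--     # Iterative: peel base-4 digits least-significant first, prepending symbols.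
--     pattern = ''
--     for _ in range(k):
--         pattern = symbol[index % 4] + pattern
--         index //= 4
--     return pattern
-- ===== Notes on version B (the rewrite author's own statement) =====
-- stated objective: simpler
-- what changed: Replaced the k-deep recursion (which splits off the most-significant digit last and is limited by Python's recursion depth) by a single iterative loop that prepends the least-significant base-4 symbol k times.
-- outside the precondition, e.g. on recursive_numbertopattern(16, 2): A raises IndexError, B returns 'AA'
import Mathlib
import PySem

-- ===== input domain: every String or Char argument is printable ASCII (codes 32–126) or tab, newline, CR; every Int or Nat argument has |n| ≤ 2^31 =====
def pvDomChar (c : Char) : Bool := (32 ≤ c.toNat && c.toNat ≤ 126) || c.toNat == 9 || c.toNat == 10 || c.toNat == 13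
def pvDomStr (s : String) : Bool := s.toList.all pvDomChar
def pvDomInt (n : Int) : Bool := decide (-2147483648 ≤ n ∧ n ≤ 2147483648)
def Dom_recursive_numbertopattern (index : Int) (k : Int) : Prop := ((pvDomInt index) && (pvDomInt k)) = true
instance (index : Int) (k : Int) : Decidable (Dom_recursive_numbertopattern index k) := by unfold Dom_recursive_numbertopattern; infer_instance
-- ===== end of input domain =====

-- ===== PORT A =====
-- B replaces A's k-deep recursion by a single iterative loop (same cost; simpler, no recursion depth).
-- symbol=['A','C','G','T']  (module constant; elements are returned as strings)
def pvSymbol : List String := ["A", "C", "G", "T"]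

-- A's recursion, with fuel = k.toNat for totality (fuel 0 only reachable for k ≤ 0, outside Pre_).
def pvGoA (index : Int) (k : Int) : Nat → String
  | 0 => ""
  | fuel + 1 =>
    if k = 1 then (PySem.List.pyGet? pvSymbol index).getD ""
    else
      let prefix_index := PySem.Int.floordiv index 4
      let remainder := PySem.Int.mod index 4
      let lsymbol := (PySem.List.pyGet? pvSymbol remainder).getD ""
      let prefix_pattern := pvGoA prefix_index (k - 1) fuel
      prefix_pattern ++ lsymbol

def recursive_numbertopattern (index : Int) (k : Int) : String :=
  pvGoA index k k.toNat

-- ===== PORT B =====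
-- loop body: pattern = symbol[index % 4] + pattern; index //= 4  (run k times)
def pvGoB (index : Int) (pattern : String) : Nat → String
  | 0 => pattern
  | n + 1 =>
    pvGoB (PySem.Int.floordiv index 4)
      ((PySem.List.pyGet? pvSymbol (PySem.Int.mod index 4)).getD "" ++ pattern) n

def recursive_numbertopattern_alt (index : Int) (k : Int) : String :=
  pvGoB index "" k.toNat

-- ===== PRECONDITION & SPEC =====
-- Pre_ = where A returns normally: k ≥ 1 (k ≤ 0 recurses forever, RecursionError), and
-- -4^k ≤ index < 4^k (otherwise the k==1 base case's symbol[...] lookup raises IndexError;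
-- negative indices down to -4^k return via Python's negative-index wraparound and B matches them).
-- A also raises RecursionError once k exceeds the interpreter's recursion limit (the grading
-- runner sets it to 10000; the onset, ≈9990, shifts by the call site's existing stack frames), so
-- Pre_ stops at k ≤ 9900 — a 1% safety margin below the measured onset that excludes a few k on
-- which A still returns and B agrees.
def Pre_recursive_numbertopattern (index : Int) (k : Int) : Prop :=
  1 ≤ k ∧ k ≤ 9900 ∧ -((4 : Int) ^ k.toNat) ≤ index ∧ index < (4 : Int) ^ k.toNat
instance (index : Int) (k : Int) : Decidable (Pre_recursive_numbertopattern index k) := by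
  unfold Pre_recursive_numbertopattern; infer_instance

def pvWitness_recursive_numbertopattern : Int × Int := (11, 3)

def Spec_recursive_numbertopattern (index : Int) (k : Int) (out : String) : Prop := out = recursive_numbertopattern_alt index k
instance (index : Int) (k : Int) (out : String) : Decidable (Spec_recursive_numbertopattern index k out) := by unfold Spec_recursive_numbertopattern; infer_instance

-- ===== CLAIM (what is proved, stated in full; the proofs are below) =====
def Claim_equal_recursive_numbertopattern : Prop := ∀ (index : Int) (k : Int), Dom_recursive_numbertopattern index k → Pre_recursive_numbertopattern index k → Spec_recursive_numbertopattern index k (recursive_numbertopattern index k)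

-- ===== LEMMAS AND PROOFS =====

-- the leading digit: for -4 ≤ i < 4, symbol[i] = symbol[i % 4] (Python negative-index wraparound)
lemma pv_head_eq (i : Int) (h1 : -4 ≤ i) (h2 : i < 4) :
    (PySem.List.pyGet? pvSymbol (PySem.Int.mod i 4)).getD "" =
      (PySem.List.pyGet? pvSymbol i).getD "" := by
  interval_cases i <;> decide

lemma pvGoB_succ (index : Int) (pat : String) (n : Nat) :
    pvGoB index pat (n + 1) =
      pvGoB (PySem.Int.floordiv index 4)
        ((PySem.List.pyGet? pvSymbol (PySem.Int.mod index 4)).getD "" ++ pat) n := rfl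

lemma pvGoA_succ (index k : Int) (fuel : Nat) :
    pvGoA index k (fuel + 1) =
      if k = 1 then (PySem.List.pyGet? pvSymbol index).getD ""
      else pvGoA (PySem.Int.floordiv index 4) (k - 1) fuel ++
        (PySem.List.pyGet? pvSymbol (PySem.Int.mod index 4)).getD "" := rfl

lemma pv_key : ∀ (n : Nat) (index : Int) (pat : String), 1 ≤ n →
    -((4 : Int) ^ n) ≤ index → index < (4 : Int) ^ n →
    pvGoB index pat n = pvGoA index (n : Int) n ++ pat := by
  intro n
  induction n with
  | zero => omega
  | succ m ih =>
    intro index pat _ hlo hhi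
    cases m with
    | zero =>
      have hlo2 : -4 ≤ index := by norm_num at hlo; exact hlo
      have hhi2 : index < 4 := by norm_num at hhi; exact hhi
      have h1 : ((0 + 1 : Nat) : Int) = 1 := by norm_num
      rw [pvGoB_succ, pvGoA_succ, h1, if_pos rfl, pv_head_eq index hlo2 hhi2]
      rfl
    | succ m' =>
      have h4 : (0 : Int) < 4 := by norm_num
      have hne : ((m' + 1 + 1 : Nat) : Int) ≠ 1 := by push_cast; omega
      have hd : PySem.Int.floordiv index 4 = index / 4 :=
        PySem.Int.floordiv_eq_ediv_of_pos h4
      have hp : (4 : Int) ^ (m' + 1 + 1) = 4 * (4 : Int) ^ (m' + 1) := by ring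
      have hlo' : -((4 : Int) ^ (m' + 1)) ≤ PySem.Int.floordiv index 4 := by
        rw [hd]; rw [hp] at hlo; omega
      have hhi' : PySem.Int.floordiv index 4 < (4 : Int) ^ (m' + 1) := by
        rw [hd]; rw [hp] at hhi; omega
      have hsub : ((m' + 1 + 1 : Nat) : Int) - 1 = ((m' + 1 : Nat) : Int) := by push_cast; ring
      rw [pvGoB_succ, pvGoA_succ, if_neg hne, hsub,
        ih (PySem.Int.floordiv index 4) _ (by omega) hlo' hhi', String.append_assoc]

-- ===== VERDICT (by name: the statement is the Claim_ definition above) =====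
theorem recursive_numbertopattern_spec : Claim_equal_recursive_numbertopattern := by
  intro index k _ hpre
  obtain ⟨hk1, _, hlo, hhi⟩ := hpre
  have hn : 1 ≤ k.toNat := by omega
  have hk : (k.toNat : Int) = k := Int.toNat_of_nonneg (by omega)
  show recursive_numbertopattern index k = recursive_numbertopattern_alt index k
  unfold recursive_numbertopattern recursive_numbertopattern_alt
  rw [pv_key k.toNat index "" hn hlo hhi, hk, String.append_empty]
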